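-- pv_equiv track=rewrite | github.com/denizozerr/Bluegem_Finder | Bluegem_Finder_mk5.py | process_and_classify_paint_seeds
-- ===== SOURCE A (Python) =====
-- de_pattern_1 = ["490", "148", "69", "704"]
--
-- de_rank_1 = ["16", "48", "66", "67", "96", "111", "117", "159", "259", "263", "273", "297", "308", "321", "324", "341",
--              "347", "461", "482", "517", "530", "567", "587", "674", "695", "723", "764", "772", "781", "790", "792",
--              "843", "880", "885", "904", "948", "990"]
--
-- de_rank_2 = ["09", "116", "134", "158", "168", "225", "338", "354", "356", "365", "370", "386", "406", "426", "433",
--              "441", "483", "537", "542", "592", "607", "611", "651", "668", "673", "696", "730", "743", "820", "846",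
--              "856", "857", "870", "876", "878", "882", "898", "900", "925", "942", "946", "951", "953", "970", "998"]
--
-- de_purple = ["29", "31", "33", "43", "72", "85", "88", "99", "104", "105", "128", "133", "136", "139", "140", "146",
--              "146", "156", "172", "174", "176", "189", "216", "217", "249", "265", "290", "293", "310", "310", "322",
--              "339", "340", "343", "363", "395", "404", "411", "437", "449", "451", "453", "458", "463", "487", "496",
--              "509", "532", "550", "572", "572", "574", "598", "599", "605", "606", "614", "621", "627", "631", "653",
--              "666", "667", "672", "683", "707", "710", "717", "727", "734", "740", "750", "766", "778", "795", "800",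
--              "804", "806", "811", "815", "816", "817", "839", "842", "848", "849", "850", "862", "877", "891", "913",
--              "926", "927", "944", "952", "969", "971", "989"]
--
-- de_gold = ["4", "6", "14", "24", "37", "74", "78", "79", "80", "87", "102", "103", "124", "132", "135", "144", "167",
--            "177", "180", "181", "182", "184", "184", "184", "205", "243", "247", "248", "252", "256", "256", "264",
--            "269", "270", "277", "289", "292", "301", "323", "325", "334", "360", "362", "367", "374", "382", "392",
--            "403", "428", "432", "443", "446", "466", "491", "492", "495", "505", "511", "527", "549", "555", "555",
--            "558", "564", "568", "568", "577", "594", "604", "608", "623", "624", "629", "637", "638", "645", "646",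
--            "646", "686", "692", "733", "735", "738", "746", "783", "798", "802", "803", "813", "837", "868", "868",
--            "887", "903", "907", "911", "914", "921", "923", "945", "986", "994"]
--
-- def process_and_classify_paint_seeds(paint_seeds):
--     # Paint Seed'leri sınıflandır
--     classified_data = []
--
--     for seed in paint_seeds:
--         if seed in de_pattern_1:
--             classified_data.append({"Paint Seed": seed, "Category": "Blue-Gem", "Color": "magenta"})
--         elif seed in de_rank_1:
--             classified_data.append({"Paint Seed": seed, "Category": "Rank 1", "Color": "magenta"})
--         elif seed in de_rank_2:
--             classified_data.append({"Paint Seed": seed, "Category": "Rank 2", "Color": "red"})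
--         elif seed in de_purple:
--             classified_data.append({"Paint Seed": seed, "Category": "Purple", "Color": "yellow"})
--         elif seed in de_gold:
--             classified_data.append({"Paint Seed": seed, "Category": "Gold", "Color": "green"})
--         else:
--             classified_data.append({"Paint Seed": seed, "Category": "Unknown", "Color": "white"})
--
--     return classified_data
-- ===== SOURCE B (Python) =====
-- # One-string-per-category table parsed into a single lookup dict; lowest priority first.
-- _TABLE = [
--     ('Gold', 'green',
--      '4 6 14 24 37 74 78 79 80 87 102 103 124 132 135 144 167 177 180 181 182 184 184 184 205 243 247 248 252 256 256 264 269 270 277 289 292 301 323 325 334 360 362 367 374 382 392 403 428 432 443 446 466 491 492 495 505 511 527 549 555 555 558 564 568 568 577 594 604 608 623 624 629 637 638 645 646 646 686 692 733 735 738 746 783 798 802 803 813 837 868 868 887 903 907 911 914 921 923 945 986 994'),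
--     ('Purple', 'yellow',
--      '29 31 33 43 72 85 88 99 104 105 128 133 136 139 140 146 146 156 172 174 176 189 216 217 249 265 290 293 310 310 322 339 340 343 363 395 404 411 437 449 451 453 458 463 487 496 509 532 550 572 572 574 598 599 605 606 614 621 627 631 653 666 667 672 683 707 710 717 727 734 740 750 766 778 795 800 804 806 811 815 816 817 839 842 848 849 850 862 877 891 913 926 927 944 952 969 971 989'),
--     ('Rank 2', 'red',
--      '09 116 134 158 168 225 338 354 356 365 370 386 406 426 433 441 483 537 542 592 607 611 651 668 673 696 730 743 820 846 856 857 870 876 878 882 898 900 925 942 946 951 953 970 998'),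
--     ('Rank 1', 'magenta',
--      '16 48 66 67 96 111 117 159 259 263 273 297 308 321 324 341 347 461 482 517 530 567 587 674 695 723 764 772 781 790 792 843 880 885 904 948 990'),
--     ('Blue-Gem', 'magenta',
--      '490 148 69 704'),
-- ]
--
--
-- def process_and_classify_paint_seeds(paint_seeds):
--     lookup = {}
--     for cat, col, seeds in _TABLE:
--         for s in seeds.split():
--             lookup[s] = (cat, col)
--     default = ("Unknown", "white")
--     return [{"Paint Seed": seed,
--              "Category": lookup.get(seed, default)[0],
--              "Color": lookup.get(seed, default)[1]}
--             for seed in paint_seeds]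
-- ===== Notes on version B (the rewrite author's own statement) =====
-- stated objective: faster
-- what changed: Replaces the per-seed five-way list-membership cascade with a compact string-encoded table parsed once into a dict seed->(category,color) (lowest priority inserted first so overlaps resolve as in A), then one pass with a constant-time lookup per seed.
import Mathlib
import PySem

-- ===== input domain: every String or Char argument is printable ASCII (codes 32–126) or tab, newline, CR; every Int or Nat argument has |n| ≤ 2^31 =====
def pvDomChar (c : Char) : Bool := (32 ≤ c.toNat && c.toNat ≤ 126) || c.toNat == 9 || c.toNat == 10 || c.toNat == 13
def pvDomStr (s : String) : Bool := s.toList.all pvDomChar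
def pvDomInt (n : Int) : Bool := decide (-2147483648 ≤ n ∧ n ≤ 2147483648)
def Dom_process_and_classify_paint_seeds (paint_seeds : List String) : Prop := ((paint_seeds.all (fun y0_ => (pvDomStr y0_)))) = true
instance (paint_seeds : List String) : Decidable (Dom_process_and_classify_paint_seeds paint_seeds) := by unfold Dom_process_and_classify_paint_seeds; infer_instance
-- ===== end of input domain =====

-- B parses a compact per-category string table into one seed -> (category, color) dict
-- (lowest priority inserted first) and classifies each seed with a single lookup,
-- instead of A's five-way list-membership cascade per seed.


-- ===== PORT A =====
def de_pattern_1 : List String := ["490", "148", "69", "704"]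
def de_rank_1 : List String := ["16", "48", "66", "67", "96", "111", "117", "159", "259", "263", "273", "297", "308", "321", "324", "341", "347", "461", "482", "517", "530", "567", "587", "674", "695", "723", "764", "772", "781", "790", "792", "843", "880", "885", "904", "948", "990"]
def de_rank_2 : List String := ["09", "116", "134", "158", "168", "225", "338", "354", "356", "365", "370", "386", "406", "426", "433", "441", "483", "537", "542", "592", "607", "611", "651", "668", "673", "696", "730", "743", "820", "846", "856", "857", "870", "876", "878", "882", "898", "900", "925", "942", "946", "951", "953", "970", "998"]
def de_purple : List String := ["29", "31", "33", "43", "72", "85", "88", "99", "104", "105", "128", "133", "136", "139", "140", "146", "146", "156", "172", "174", "176", "189", "216", "217", "249", "265", "290", "293", "310", "310", "322", "339", "340", "343", "363", "395", "404", "411", "437", "449", "451", "453", "458", "463", "487", "496", "509", "532", "550", "572", "572", "574", "598", "599", "605", "606", "614", "621", "627", "631", "653", "666", "667", "672", "683", "707", "710", "717", "727", "734", "740", "750", "766", "778", "795", "800", "804", "806", "811", "815", "816", "817", "839", "842", "848", "849", "850", "862", "877", "891", "913", "926", "927", "944", "952", "969", "971", "989"]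
def de_gold : List String := ["4", "6", "14", "24", "37", "74", "78", "79", "80", "87", "102", "103", "124", "132", "135", "144", "167", "177", "180", "181", "182", "184", "184", "184", "205", "243", "247", "248", "252", "256", "256", "264", "269", "270", "277", "289", "292", "301", "323", "325", "334", "360", "362", "367", "374", "382", "392", "403", "428", "432", "443", "446", "466", "491", "492", "495", "505", "511", "527", "549", "555", "555", "558", "564", "568", "568", "577", "594", "604", "608", "623", "624", "629", "637", "638", "645", "646", "646", "686", "692", "733", "735", "738", "746", "783", "798", "802", "803", "813", "837", "868", "868", "887", "903", "907", "911", "914", "921", "923", "945", "986", "994"]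

def process_and_classify_paint_seeds (paint_seeds : List String) : List (List (String × String)) :=
  paint_seeds.foldl (fun classified_data seed =>
    if seed ∈ de_pattern_1 then
      classified_data ++ [[("Paint Seed", seed), ("Category", "Blue-Gem"), ("Color", "magenta")]]
    else if seed ∈ de_rank_1 then
      classified_data ++ [[("Paint Seed", seed), ("Category", "Rank 1"), ("Color", "magenta")]]
    else if seed ∈ de_rank_2 then
      classified_data ++ [[("Paint Seed", seed), ("Category", "Rank 2"), ("Color", "red")]]
    else if seed ∈ de_purple then
      classified_data ++ [[("Paint Seed", seed), ("Category", "Purple"), ("Color", "yellow")]]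
    else if seed ∈ de_gold then
      classified_data ++ [[("Paint Seed", seed), ("Category", "Gold"), ("Color", "green")]]
    else
      classified_data ++ [[("Paint Seed", seed), ("Category", "Unknown"), ("Color", "white")]]) []

-- ===== PORT B =====
-- B's _TABLE: (category, color, space-joined seeds), lowest priority first
def pvTable : List (String × String × String) :=
  [("Gold", "green", "4 6 14 24 37 74 78 79 80 87 102 103 124 132 135 144 167 177 180 181 182 184 184 184 205 243 247 248 252 256 256 264 269 270 277 289 292 301 323 325 334 360 362 367 374 382 392 403 428 432 443 446 466 491 492 495 505 511 527 549 555 555 558 564 568 568 577 594 604 608 623 624 629 637 638 645 646 646 686 692 733 735 738 746 783 798 802 803 813 837 868 868 887 903 907 911 914 921 923 945 986 994"),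
   ("Purple", "yellow", "29 31 33 43 72 85 88 99 104 105 128 133 136 139 140 146 146 156 172 174 176 189 216 217 249 265 290 293 310 310 322 339 340 343 363 395 404 411 437 449 451 453 458 463 487 496 509 532 550 572 572 574 598 599 605 606 614 621 627 631 653 666 667 672 683 707 710 717 727 734 740 750 766 778 795 800 804 806 811 815 816 817 839 842 848 849 850 862 877 891 913 926 927 944 952 969 971 989"),
   ("Rank 2", "red", "09 116 134 158 168 225 338 354 356 365 370 386 406 426 433 441 483 537 542 592 607 611 651 668 673 696 730 743 820 846 856 857 870 876 878 882 898 900 925 942 946 951 953 970 998"),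
   ("Rank 1", "magenta", "16 48 66 67 96 111 117 159 259 263 273 297 308 321 324 341 347 461 482 517 530 567 587 674 695 723 764 772 781 790 792 843 880 885 904 948 990"),
   ("Blue-Gem", "magenta", "490 148 69 704")]

def pvLookup : PySem.Dict String (String × String) :=
  pvTable.foldl
    (fun lookup t => (PySem.Str.split₀ t.2.2).foldl
      (fun lk s => lk.insert s (t.1, t.2.1)) lookup)
    PySem.Dict.empty

def process_and_classify_paint_seeds_alt (paint_seeds : List String) : List (List (String × String)) :=
  paint_seeds.map (fun seed =>
    [("Paint Seed", seed),
     ("Category", (pvLookup.getD seed ("Unknown", "white")).1),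
     ("Color", (pvLookup.getD seed ("Unknown", "white")).2)])

-- ===== PRECONDITION & SPEC =====
def Spec_process_and_classify_paint_seeds (paint_seeds : List String) (out : List (List (String × String))) : Prop := out = process_and_classify_paint_seeds_alt paint_seeds
instance (paint_seeds : List String) (out : List (List (String × String))) : Decidable (Spec_process_and_classify_paint_seeds paint_seeds out) := by unfold Spec_process_and_classify_paint_seeds; infer_instance

-- ===== CLAIM (what is proved, stated in full; the proofs are below) =====
def Claim_equal_process_and_classify_paint_seeds : Prop := ∀ (paint_seeds : List String), Dom_process_and_classify_paint_seeds paint_seeds → Spec_process_and_classify_paint_seeds paint_seeds (process_and_classify_paint_seeds paint_seeds)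

-- ===== LEMMAS AND PROOFS =====

-- inserting every key of ls with the same value v: lookup is v on ls, unchanged elsewhere
theorem getD_foldl_insert_const (ls : List String) (v d0 : String × String)
    (d : PySem.Dict String (String × String)) (k : String) :
    (ls.foldl (fun d' s => d'.insert s v) d).getD k d0
      = if k ∈ ls then v else d.getD k d0 := by
  induction ls generalizing d with
  | nil => simp
  | cons h t ih =>
    simp only [List.foldl_cons, ih, PySem.Dict.getD_insert, List.mem_cons]
    by_cases hkt : k ∈ t <;> by_cases hkh : k = h <;> simp [hkt, hkh]

-- B's parsed rows are exactly A's category lists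
set_option maxRecDepth 20000
theorem split_gold : PySem.Str.split₀ "4 6 14 24 37 74 78 79 80 87 102 103 124 132 135 144 167 177 180 181 182 184 184 184 205 243 247 248 252 256 256 264 269 270 277 289 292 301 323 325 334 360 362 367 374 382 392 403 428 432 443 446 466 491 492 495 505 511 527 549 555 555 558 564 568 568 577 594 604 608 623 624 629 637 638 645 646 646 686 692 733 735 738 746 783 798 802 803 813 837 868 868 887 903 907 911 914 921 923 945 986 994" = de_gold := by decide
theorem split_purple : PySem.Str.split₀ "29 31 33 43 72 85 88 99 104 105 128 133 136 139 140 146 146 156 172 174 176 189 216 217 249 265 290 293 310 310 322 339 340 343 363 395 404 411 437 449 451 453 458 463 487 496 509 532 550 572 572 574 598 599 605 606 614 621 627 631 653 666 667 672 683 707 710 717 727 734 740 750 766 778 795 800 804 806 811 815 816 817 839 842 848 849 850 862 877 891 913 926 927 944 952 969 971 989" = de_purple := by decide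
theorem split_rank_2 : PySem.Str.split₀ "09 116 134 158 168 225 338 354 356 365 370 386 406 426 433 441 483 537 542 592 607 611 651 668 673 696 730 743 820 846 856 857 870 876 878 882 898 900 925 942 946 951 953 970 998" = de_rank_2 := by decide
theorem split_rank_1 : PySem.Str.split₀ "16 48 66 67 96 111 117 159 259 263 273 297 308 321 324 341 347 461 482 517 530 567 587 674 695 723 764 772 781 790 792 843 880 885 904 948 990" = de_rank_1 := by decide
theorem split_pattern_1 : PySem.Str.split₀ "490 148 69 704" = de_pattern_1 := by decide

-- the dict lookup agrees with A's membership cascade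
theorem lookup_getD (k : String) :
    pvLookup.getD k ("Unknown", "white")
      = if k ∈ de_pattern_1 then ("Blue-Gem", "magenta")
        else if k ∈ de_rank_1 then ("Rank 1", "magenta")
        else if k ∈ de_rank_2 then ("Rank 2", "red")
        else if k ∈ de_purple then ("Purple", "yellow")
        else if k ∈ de_gold then ("Gold", "green")
        else ("Unknown", "white") := by
  unfold pvLookup
  simp only [pvTable, List.foldl_cons, List.foldl_nil]
  rw [split_gold, split_purple, split_rank_2, split_rank_1, split_pattern_1,
      getD_foldl_insert_const, getD_foldl_insert_const, getD_foldl_insert_const,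
      getD_foldl_insert_const, getD_foldl_insert_const, PySem.Dict.getD_empty]

theorem cascade_foldl (paint_seeds : List String) (acc : List (List (String × String))) :
    paint_seeds.foldl (fun classified_data seed =>
      if seed ∈ de_pattern_1 then
        classified_data ++ [[("Paint Seed", seed), ("Category", "Blue-Gem"), ("Color", "magenta")]]
      else if seed ∈ de_rank_1 then
        classified_data ++ [[("Paint Seed", seed), ("Category", "Rank 1"), ("Color", "magenta")]]
      else if seed ∈ de_rank_2 then
        classified_data ++ [[("Paint Seed", seed), ("Category", "Rank 2"), ("Color", "red")]]
      else if seed ∈ de_purple then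
        classified_data ++ [[("Paint Seed", seed), ("Category", "Purple"), ("Color", "yellow")]]
      else if seed ∈ de_gold then
        classified_data ++ [[("Paint Seed", seed), ("Category", "Gold"), ("Color", "green")]]
      else
        classified_data ++ [[("Paint Seed", seed), ("Category", "Unknown"), ("Color", "white")]]) acc
    = acc ++ process_and_classify_paint_seeds_alt paint_seeds := by
  induction paint_seeds generalizing acc with
  | nil => simp [process_and_classify_paint_seeds_alt]
  | cons h t ih =>
    simp only [List.foldl_cons, ih, process_and_classify_paint_seeds_alt, List.map_cons,
      lookup_getD]
    split_ifs <;> simp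

-- ===== VERDICT (by name: the statement is the Claim_ definition above) =====
theorem process_and_classify_paint_seeds_spec : Claim_equal_process_and_classify_paint_seeds := by
  intro paint_seeds _
  show process_and_classify_paint_seeds paint_seeds = _
  rw [process_and_classify_paint_seeds, cascade_foldl]
  simp
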